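-- pv_equiv track=rewrite | github.com/f4ine-nicolas/uv-k5-firmware-docs | doc_tools/doc_coverage.py | offset_to_line
-- ===== SOURCE A (Python) =====
-- from typing import List, Tuple, Dict, Iterable
--
-- def offset_to_line(spans: List[Tuple[int,int]], offset: int) -> int:
--     lo, hi = 0, len(spans)-1
--     while lo <= hi:
--         mid = (lo + hi) // 2
--         s, e = spans[mid]
--         if s <= offset < e:
--             return mid
--         if offset < s:
--             hi = mid - 1
--         else:
--             lo = mid + 1
--     return max(0, min(len(spans)-1, lo))
-- ===== SOURCE B (Python) =====
-- def offset_to_line(spans, offset):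
--     # Structural recursion on list slices: go(seg, base) searches the segment
--     # seg = spans[base : base+len(seg)], returning base+local index on a hit and
--     # the clamped insertion point when the segment is exhausted.
--     def go(seg, base):
--         if not seg:
--             return max(0, min(len(spans) - 1, base))
--         m = (len(seg) - 1) // 2
--         s, e = seg[m]
--         if s <= offset < e:
--             return base + m
--         if offset < s:
--             return go(seg[:m], base)
--         return go(seg[m + 1:], base + m + 1)
--     return go(spans, 0)
-- ===== Notes on version B (the rewrite author's own statement) =====
-- stated objective: alternative
-- what changed: A's iterative binary search over a mutable (lo, hi) index pair is replaced by structural recursion on list slices (seg[:m] / seg[m+1:]) carrying a base-index accumulator, with the clamped insertion point produced at the empty-slice base case.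
import Mathlib
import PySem

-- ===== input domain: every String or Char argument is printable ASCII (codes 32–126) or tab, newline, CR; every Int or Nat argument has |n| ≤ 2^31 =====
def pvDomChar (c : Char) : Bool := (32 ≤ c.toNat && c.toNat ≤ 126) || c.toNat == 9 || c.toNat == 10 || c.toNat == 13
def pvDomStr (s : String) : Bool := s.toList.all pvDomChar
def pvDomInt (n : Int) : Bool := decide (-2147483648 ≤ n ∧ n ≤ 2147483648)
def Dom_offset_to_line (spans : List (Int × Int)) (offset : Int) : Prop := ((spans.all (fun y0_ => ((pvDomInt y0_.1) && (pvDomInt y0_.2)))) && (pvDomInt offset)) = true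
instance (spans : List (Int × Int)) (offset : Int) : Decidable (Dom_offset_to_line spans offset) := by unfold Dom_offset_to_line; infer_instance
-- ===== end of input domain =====

-- B replaces A's iterative (lo,hi)-index binary search by structural recursion on
-- list slices with a base-index accumulator; objective: alternative decomposition.


-- ===== PORT A =====
-- the while-loop over mutable state (lo, hi); the 'none' arm is unreachable from the entry call
def offset_to_line_loop (spans : List (Int × Int)) (offset : Int) (lo hi : Int) : Int :=
  if h : lo ≤ hi then
    let mid := PySem.Int.floordiv (lo + hi) 2
    match PySem.List.pyGet? spans mid with
    | some (s, e) =>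
        if s ≤ offset ∧ offset < e then mid
        else if offset < s then offset_to_line_loop spans offset lo (mid - 1)
        else offset_to_line_loop spans offset (mid + 1) hi
    | none => 0
  else max 0 (min ((spans.length : Int) - 1) lo)
termination_by (hi + 1 - lo).toNat
decreasing_by
  · have := PySem.Int.floordiv_two_mid_bounds h; omega
  · have := PySem.Int.floordiv_two_mid_bounds h; omega

def offset_to_line (spans : List (Int × Int)) (offset : Int) : Int :=
  offset_to_line_loop spans offset 0 ((spans.length : Int) - 1)

-- ===== PORT B =====
-- go(seg, base): structural recursion on slices; seg[:m] / seg[m+1:] are ported as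
-- List.take m / List.drop (m+1), exact for 0 ≤ m ≤ len(seg)
def offset_to_line_go (spans : List (Int × Int)) (offset : Int) : List (Int × Int) → Int → Int
  | [], base => max 0 (min ((spans.length : Int) - 1) base)
  | seg@(_ :: _), base =>
      let m : Nat := (seg.length - 1) / 2
      match seg[m]? with
      | some (s, e) =>
          if s ≤ offset ∧ offset < e then base + (m : Int)
          else if offset < s then offset_to_line_go spans offset (seg.take m) base
          else offset_to_line_go spans offset (seg.drop (m + 1)) (base + (m : Int) + 1)
      | none => 0
termination_by seg => seg.length
decreasing_by
  · subst seg; simp [List.length_take]; omega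
  · subst seg; simp [List.length_drop]

def offset_to_line_alt (spans : List (Int × Int)) (offset : Int) : Int :=
  offset_to_line_go spans offset spans 0

-- ===== PRECONDITION & SPEC =====
def Spec_offset_to_line (spans : List (Int × Int)) (offset : Int) (out : Int) : Prop := out = offset_to_line_alt spans offset
instance (spans : List (Int × Int)) (offset : Int) (out : Int) : Decidable (Spec_offset_to_line spans offset out) := by unfold Spec_offset_to_line; infer_instance

-- ===== CLAIM (what is proved, stated in full; the proofs are below) =====
def Claim_equal_offset_to_line : Prop := ∀ (spans : List (Int × Int)) (offset : Int), Dom_offset_to_line spans offset → Spec_offset_to_line spans offset (offset_to_line spans offset)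

-- ===== LEMMAS AND PROOFS =====
lemma loop_eq_go (spans : List (Int × Int)) (offset : Int) :
    ∀ (n : Nat) (lo hi : Int), (hi + 1 - lo).toNat ≤ n → 0 ≤ lo → hi < (spans.length : Int) →
      offset_to_line_loop spans offset lo hi =
        offset_to_line_go spans offset ((spans.drop lo.toNat).take (hi + 1 - lo).toNat) lo := by
  intro n
  induction n with
  | zero =>
      intro lo hi hfuel h0 hhi
      have hz : (hi + 1 - lo).toNat = 0 := by omega
      rw [offset_to_line_loop, hz]
      simp only [dif_neg (show ¬ lo ≤ hi by omega), List.take_zero, offset_to_line_go]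
  | succ n ih =>
      intro lo hi hfuel h0 hhi
      by_cases h : lo ≤ hi
      · set a := lo.toNat with ha
        set b := (hi + 1 - lo).toNat with hb
        have hb1 : 1 ≤ b := by omega
        have habn : a + b ≤ spans.length := by omega
        set m := (b - 1) / 2 with hm
        have hmb : m < b := by omega
        have hmid : PySem.Int.floordiv (lo + hi) 2 = lo + (m : Int) := by
          rw [PySem.Int.floordiv_eq_ediv_of_pos (by norm_num)]; omega
        have hidx : a + m < spans.length := by omega
        have hget : spans[a + m]? = some spans[a + m] := List.getElem?_eq_getElem hidx
        obtain ⟨s, e, hp⟩ : ∃ s e, spans[a + m] = (s, e) := ⟨_, _, rfl⟩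
        -- LHS
        rw [offset_to_line_loop]
        simp only [dif_pos h, hmid,
          show lo + (m : Int) = ((a + m : Nat) : Int) by omega,
          PySem.List.pyGet?_natCast, hget]
        -- RHS
        have hlen : ((spans.drop a).take b).length = b := by
          simp [List.length_take, List.length_drop]; omega
        cases hseg : (spans.drop a).take b with
        | nil => simp [hseg] at hlen; omega
        | cons x t =>
            rw [offset_to_line_go]
            have hlen' : (x :: t).length = b := hseg ▸ hlen
            have hmseg : ((x :: t).length - 1) / 2 = m := by rw [hlen']
            have hsegget : (x :: t)[((x :: t).length - 1) / 2]? = some (s, e) := by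
              rw [hmseg, ← hseg, List.getElem?_take, if_pos hmb, List.getElem?_drop, hget, hp]
            rw [hsegget]
            simp only [List.get_eq_getElem, hp, hmseg]
            by_cases hin : s ≤ offset ∧ offset < e
            · simp only [if_pos hin]; omega
            · simp only [if_neg hin]
              by_cases hlt : offset < s
              · simp only [if_pos hlt]
                have hrec := ih lo (((a + m : Nat) : Int) - 1) (by omega) h0 (by omega)
                rw [hrec]
                have he1 : ((((a + m : Nat) : Int) - 1) + 1 - lo).toNat = m := by omega
                rw [he1, ← hseg, List.take_take, Nat.min_eq_left (le_of_lt hmb)]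
              · simp only [if_neg hlt]
                have hrec := ih (((a + m : Nat) : Int) + 1) hi (by omega) (by omega) hhi
                rw [hrec]
                have h1 : (((a + m : Nat) : Int) + 1).toNat = a + m + 1 := by omega
                have h2 : (hi + 1 - (((a + m : Nat) : Int) + 1)).toNat = b - (m + 1) := by omega
                rw [h1, h2, ← hseg, List.drop_take, List.drop_drop,
                  show a + (m + 1) = a + m + 1 from by omega]
                congr 1
                omega
      · have hz : (hi + 1 - lo).toNat = 0 := by omega
        rw [offset_to_line_loop, hz]
        simp only [dif_neg h, List.take_zero, offset_to_line_go]

-- ===== VERDICT (by name: the statement is the Claim_ definition above) =====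
theorem offset_to_line_spec : Claim_equal_offset_to_line := by
  intro spans offset _
  unfold Spec_offset_to_line offset_to_line offset_to_line_alt
  have h := loop_eq_go spans offset ((spans.length : Int) + 1 - 0).toNat 0 ((spans.length : Int) - 1)
    (by omega) le_rfl (by omega)
  simpa using h
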